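-- pv_equiv track=rewrite | github.com/vnykmshr/playbook | tests/test_command_conventions.py | get_related_commands_count
-- ===== SOURCE A (Python) =====
-- def get_related_commands_count(content: str) -> int:
--     """Count Related Commands links in standard section."""
--     in_section = False
--     count = 0
--     for line in content.splitlines():
--         if line.strip().startswith("## Related Commands"):
--             in_section = True
--             continue
--         if in_section:
--             if line.startswith("## ") or line.startswith("---"):
--                 break
--             if line.strip().startswith("- `/pb-"):
--                 count += 1
--     return count
-- ===== SOURCE B (Python) =====
-- def get_related_commands_count(content: str) -> int:
--     """Count Related Commands links in standard section."""
--     lines = content.splitlines()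
--     headers = [i for i, line in enumerate(lines) if line.strip().startswith("## Related Commands")]
--     if not headers:
--         return 0
--     tail = lines[headers[0] + 1:]
--     stops = [i for i, line in enumerate(tail) if line.startswith("## ") or line.startswith("---")]
--     section = tail[:stops[0]] if stops else tail
--     return sum(line.strip().startswith("- `/pb-") for line in section)
-- ===== Notes on version B (the rewrite author's own statement) =====
-- stated objective: idiomatic
-- what changed: Replaces the stateful flag-and-break loop with an index/slice computation: comprehensions collect header and boundary positions, the section is cut out with slices, and items are counted with a sum over it; Pre_ excludes content with a repeated '## Related Commands' header line, a corner where A skips the repeat while B lets an unindented repeat end the section and either reading is defensible.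
-- outside the precondition, e.g. on get_related_commands_count('## Related Commands\nx\n## Related Commands\n- `/pb-a`'): A returns 1, B returns 0
import Mathlib
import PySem

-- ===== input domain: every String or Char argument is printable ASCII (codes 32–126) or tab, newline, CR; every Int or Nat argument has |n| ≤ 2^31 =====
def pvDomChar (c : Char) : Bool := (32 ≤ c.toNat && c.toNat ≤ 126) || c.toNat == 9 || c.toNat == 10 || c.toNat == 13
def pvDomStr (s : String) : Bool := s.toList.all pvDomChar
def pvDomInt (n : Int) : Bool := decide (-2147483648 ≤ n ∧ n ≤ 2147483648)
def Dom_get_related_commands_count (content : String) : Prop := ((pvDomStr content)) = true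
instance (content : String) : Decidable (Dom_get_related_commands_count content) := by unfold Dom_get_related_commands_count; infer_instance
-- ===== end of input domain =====

-- B: computes header/boundary positions with comprehensions and cuts the section out by slicing, instead of A's in_section flag with break; Pre_ excludes repeated-header content, where section delimiting is unspecified.


-- shared line predicates (inlined strings in both Pythons)
def grcHd (line : String) : Bool := PySem.Str.startswith (PySem.Str.strip line) "## Related Commands"
def grcBd (line : String) : Bool := PySem.Str.startswith line "## " || PySem.Str.startswith line "---"
def grcIt (line : String) : Bool := PySem.Str.startswith (PySem.Str.strip line) "- `/pb-"

-- ===== PORT A =====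
-- A's loop: state (in_section, count), early break returning count
def grcLoopA : List String → Bool → Int → Int
  | [], _, count => count
  | line :: rest, inSection, count =>
    if grcHd line then grcLoopA rest true count
    else if inSection then
      if grcBd line then count
      else if grcIt line then grcLoopA rest inSection (count + 1)
      else grcLoopA rest inSection count
    else grcLoopA rest inSection count

def get_related_commands_count (content : String) : Int :=
  grcLoopA (PySem.Str.splitlines content) false 0

-- ===== PORT B =====
-- [i for i, line in enumerate(t) if p(line)]
def grcIdxs (p : String → Bool) (t : List String) (s : Int) : List Int :=
  ((PySem.List.enumerate t s).filter (fun q => p q.2)).map (·.1)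

def get_related_commands_count_alt (content : String) : Int :=
  let lines := PySem.Str.splitlines content
  match grcIdxs grcHd lines 0 with
  | [] => 0
  | h :: _ =>
    let tail := PySem.List.slice lines (some (h + 1)) none
    let sect := match grcIdxs grcBd tail 0 with
      | [] => tail
      | j :: _ => PySem.List.slice tail none (some j)
    (sect.map (fun line => if grcIt line then (1 : Int) else 0)).sum

-- ===== PRECONDITION & SPEC =====
-- Pre_ excludes content with a repeated '## Related Commands' header line (A still returns there):
-- A skips repeated headers inside the section while B lets an unindented repeat end it — which
-- occurrence delimits the section is unspecified, so either reading is defensible.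
def Pre_get_related_commands_count (content : String) : Prop :=
  (PySem.Str.splitlines content).countP grcHd ≤ 1
instance (content : String) : Decidable (Pre_get_related_commands_count content) := by
  unfold Pre_get_related_commands_count; infer_instance

def pvWitness_get_related_commands_count : String :=
  "## Related Commands\n- `/pb-build`\n- `/pb-test`\n---\nx"

def Spec_get_related_commands_count (content : String) (out : Int) : Prop := out = get_related_commands_count_alt content
instance (content : String) (out : Int) : Decidable (Spec_get_related_commands_count content out) := by unfold Spec_get_related_commands_count; infer_instance

-- ===== CLAIM (what is proved, stated in full; the proofs are below) =====
def Claim_equal_get_related_commands_count : Prop := ∀ (content : String), Dom_get_related_commands_count content → Pre_get_related_commands_count content → Spec_get_related_commands_count content (get_related_commands_count content)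

-- ===== LEMMAS AND PROOFS =====

-- the count A produces inside the section, as B computes it: items in the prefix before the first boundary
def grcSec (t : List String) : Int :=
  ((t.takeWhile (fun l => !grcBd l)).map (fun line => if grcIt line then (1 : Int) else 0)).sum

lemma grcIdxs_cons (p : String → Bool) (x : String) (t : List String) (s : Int) :
    grcIdxs p (x :: t) s = (if p x then [s] else []) ++ grcIdxs p t (s + 1) := by
  simp [grcIdxs, PySem.List.enumerate_cons]
  split_ifs with h <;> simp [h]

lemma grcIdxs_shift (p : String → Bool) (t : List String) : ∀ s : Int,
    grcIdxs p t (s + 1) = (grcIdxs p t s).map (· + 1) := by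
  induction t with
  | nil => intro s; rfl
  | cons x t ih =>
    intro s
    rw [grcIdxs_cons, grcIdxs_cons, List.map_append, ih (s + 1), ih s]
    split_ifs <;> simp

lemma grcIdxs_nonneg (p : String → Bool) (t : List String) (j : Int)
    (hj : j ∈ grcIdxs p t 0) : 0 ≤ j := by
  simp only [grcIdxs, List.mem_map, List.mem_filter] at hj
  obtain ⟨q, ⟨hq, -⟩, rfl⟩ := hj
  rw [PySem.List.mem_enumerate_iff] at hq
  obtain ⟨k, -, rfl⟩ := hq
  simp

-- B's stops/slice computation is the prefix before the first boundary
lemma grcSection_eq (t : List String) :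
    (match grcIdxs grcBd t 0 with
      | [] => t
      | j :: _ => PySem.List.slice t none (some j)) = t.takeWhile (fun l => !grcBd l) := by
  induction t with
  | nil => rfl
  | cons x t ih =>
    rw [grcIdxs_cons]
    by_cases hx : grcBd x
    · rw [if_pos hx]
      simp only [List.singleton_append]
      rw [PySem.List.slice_to _ le_rfl]
      simp [hx]
    · rw [if_neg hx, List.nil_append, grcIdxs_shift]
      rcases h : grcIdxs grcBd t 0 with _ | ⟨j, js⟩
      · have ih2 : t = List.takeWhile (fun l => !grcBd l) t := by rw [← ih, h]
        simp only [List.map_nil]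
        rw [List.takeWhile_cons_of_pos (by simp [hx]), ← ih2]
      · have hj : 0 ≤ j := grcIdxs_nonneg _ _ _ (h ▸ List.mem_cons_self)
        have ih2 : PySem.List.slice t none (some j) = List.takeWhile (fun l => !grcBd l) t := by
          rw [← ih, h]
        simp only [List.map_cons]
        rw [PySem.List.slice_to _ (by omega : (0:Int) ≤ j + 1),
            show (j + 1).toNat = j.toNat + 1 by omega, List.take_succ_cons,
            List.takeWhile_cons_of_pos (by simp [hx]), ← ih2,
            PySem.List.slice_to _ hj]

-- A's loop inside the section, on header-free lines, counts the items before the first boundary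
lemma grcLoopA_true (t : List String) (hfree : ∀ l ∈ t, grcHd l = false) :
    ∀ c : Int, grcLoopA t true c = c + grcSec t := by
  induction t with
  | nil => intro c; simp [grcLoopA, grcSec]
  | cons x t ih =>
    intro c
    have hx := hfree x List.mem_cons_self
    have hrest : ∀ l ∈ t, grcHd l = false := fun l hl => hfree l (List.mem_cons_of_mem _ hl)
    simp only [grcLoopA, hx, Bool.false_eq_true, if_false]
    by_cases hb : grcBd x
    · simp [hb, grcSec]
    · simp only [hb, Bool.false_eq_true, if_false]
      by_cases hi : grcIt x
      · rw [hi, if_pos rfl, ih hrest]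
        simp [grcSec, hb, hi]; ring
      · simp only [hi, Bool.false_eq_true, if_false]
        rw [ih hrest]
        simp [grcSec, hb, hi]

-- main induction over the line list, under "at most one header line"
lemma grc_main (L : List String) (hpre : L.countP grcHd ≤ 1) :
    grcLoopA L false 0 =
      (match grcIdxs grcHd L 0 with
        | [] => 0
        | h :: _ =>
          let tail := PySem.List.slice L (some (h + 1)) none
          let sect := match grcIdxs grcBd tail 0 with
            | [] => tail
            | j :: _ => PySem.List.slice tail none (some j)
          (sect.map (fun line => if grcIt line then (1 : Int) else 0)).sum) := by
  induction L with
  | nil => rfl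
  | cons x t ih =>
    by_cases hx : grcHd x
    · -- x is the unique header: A flips the flag, B slices off x and counts to the boundary
      have h0 : t.countP grcHd = 0 := by
        rw [List.countP_cons, if_pos hx] at hpre; omega
      have hfree : ∀ l ∈ t, grcHd l = false := by
        intro l hl
        simpa using List.countP_eq_zero.mp h0 l hl
      rw [grcIdxs_cons, if_pos hx]
      simp only [List.singleton_append, grcLoopA, hx, if_true]
      rw [grcLoopA_true t hfree 0,
          show PySem.List.slice (x :: t) (some ((0:Int) + 1)) = t by
            rw [show ((0:Int) + 1) = 1 by norm_num, PySem.List.slice_from_one]; rfl,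
          grcSection_eq t]
      simp [grcSec]
    · -- x is not a header: both sides reduce to the same computation on t
      have hpre' : t.countP grcHd ≤ 1 := by
        rw [List.countP_cons, if_neg hx] at hpre; omega
      simp only [grcLoopA, hx, Bool.false_eq_true, if_false]
      rw [ih hpre', grcIdxs_cons, if_neg hx, List.nil_append, grcIdxs_shift]
      rcases h : grcIdxs grcHd t 0 with _ | ⟨hd, hs⟩
      · simp
      · have hhd : 0 ≤ hd := grcIdxs_nonneg _ _ _ (h ▸ List.mem_cons_self)
        simp only [List.map_cons]
        rw [show PySem.List.slice (x :: t) (some (hd + 1 + 1))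
              = PySem.List.slice t (some (hd + 1)) by
            rw [PySem.List.slice_from _ (by omega : (0:Int) ≤ hd + 1 + 1),
                PySem.List.slice_from _ (by omega : (0:Int) ≤ hd + 1),
                show (hd + 1 + 1).toNat = (hd + 1).toNat + 1 by omega, List.drop_succ_cons]]

-- ===== VERDICT (by name: the statement is the Claim_ definition above) =====
theorem get_related_commands_count_spec : Claim_equal_get_related_commands_count := by
  intro content _ hpre
  unfold Spec_get_related_commands_count get_related_commands_count get_related_commands_count_alt
  exact grc_main _ hpre
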